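-- pv_equiv track=rewrite | github.com/pinobatch/pently | tools/pentlyas.py | parse_trackset
-- ===== SOURCE A (Python) =====
-- pitched_tracks = {'pulse1': 0, 'pulse2': 1, 'triangle': 2, 'attack': 4}
--
-- def parse_trackset(tracks):
--     tracks_to_stop = set()
--     tracks_unknown = []
--     for trackname in tracks:
--         if trackname == 'drum':
--             tracks_to_stop.add(3)
--             continue
--         try:
--             track = pitched_tracks[trackname]
--         except KeyError:
--             tracks_unknown.append(trackname)
--             continue
--         else:
--             tracks_to_stop.add(track)
--     if tracks_unknown:
--         raise ValueError("unknown track names: "+" ".join(tracks_unknown))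
--     return tracks_to_stop
-- ===== SOURCE B (Python) =====
-- STOP_INDEX = {'drum': 3, 'pulse1': 0, 'pulse2': 1, 'triangle': 2, 'attack': 4}
--
-- def parse_trackset(tracks):
--     tracks = list(tracks)
--     unknown = set(tracks) - STOP_INDEX.keys()
--     if unknown:
--         raise ValueError("unknown track names: " + " ".join(sorted(unknown)))
--     return {STOP_INDEX[n] for n in dict.fromkeys(tracks)}
-- ===== Notes on version B (the rewrite author's own statement) =====
-- stated objective: alternative
-- what changed: Replaces A's per-element try/except loop with two accumulators and a 'drum' special case by set algebra on a single merged name-to-index table: validation is one set difference (set(tracks) - table keys), and the result is the table image of the first-occurrence-deduplicated names.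
import Mathlib
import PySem

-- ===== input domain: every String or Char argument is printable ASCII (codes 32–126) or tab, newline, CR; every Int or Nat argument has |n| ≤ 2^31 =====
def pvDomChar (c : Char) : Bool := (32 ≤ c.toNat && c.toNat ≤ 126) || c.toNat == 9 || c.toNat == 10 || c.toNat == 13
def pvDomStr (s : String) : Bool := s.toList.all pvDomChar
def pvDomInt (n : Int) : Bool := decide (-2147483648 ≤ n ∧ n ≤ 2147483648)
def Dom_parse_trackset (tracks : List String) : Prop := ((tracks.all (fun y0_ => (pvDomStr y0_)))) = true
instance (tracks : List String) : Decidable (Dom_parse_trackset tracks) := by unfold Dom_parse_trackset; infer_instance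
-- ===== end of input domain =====

-- B replaces A's per-element try/except loop (two accumulators, 'drum' special case) by set algebra
-- on one merged name->index table: validate with a set difference, then map the deduplicated names.
-- Objective: alternative (same cost, different decomposition).


-- ===== PORT A =====
def pitched_tracks : PySem.Dict String Int :=
  PySem.Dict.ofList [("pulse1", 0), ("pulse2", 1), ("triangle", 2), ("attack", 4)]

-- A's for-loop: state (tracks_to_stop, tracks_unknown)
def parseLoopA : List String → PySem.Set Int → List String → (PySem.Set Int × List String)
  | [], s, u => (s, u)
  | t :: rest, s, u =>
    if t = "drum" then parseLoopA rest (PySem.Set.add s 3) u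
    else
      match pitched_tracks.get? t with
      | none => parseLoopA rest s (u ++ [t])          -- KeyError branch
      | some v => parseLoopA rest (PySem.Set.add s v) u

def parse_trackset (tracks : List String) : List Int :=
  let r := parseLoopA tracks PySem.Set.empty []
  if r.2 ≠ [] then [] else r.1   -- ValueError raised when r.2 ≠ []: outside Pre_

-- ===== PORT B =====
def STOP_INDEX : PySem.Dict String Int :=
  PySem.Dict.ofList [("drum", 3), ("pulse1", 0), ("pulse2", 1), ("triangle", 2), ("attack", 4)]

def parse_trackset_alt (tracks : List String) : List Int :=
  let unknown := PySem.Set.diff (PySem.Set.ofList tracks) STOP_INDEX.keys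
  if unknown ≠ [] then []        -- ValueError raised: outside Pre_
  else PySem.Set.ofList
    ((PySem.List.dedup tracks).map (fun n => STOP_INDEX.getD n 0))
    -- STOP_INDEX[n]: in this branch every n is a key, so the getD default is never used

-- ===== PRECONDITION & SPEC =====
-- Pre_ excludes exactly the inputs containing a name that is neither 'drum' nor a pitched
-- track, on which the Python A raises ValueError.
def Pre_parse_trackset (tracks : List String) : Prop :=
  ∀ t ∈ tracks, t ∈ ["drum", "pulse1", "pulse2", "triangle", "attack"]
instance (tracks : List String) : Decidable (Pre_parse_trackset tracks) := by
  unfold Pre_parse_trackset; infer_instance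
def pvWitness_parse_trackset : List String := ["drum", "pulse1", "attack", "pulse1"]

def Spec_parse_trackset (tracks : List String) (out : List Int) : Prop := out = parse_trackset_alt tracks
instance (tracks : List String) (out : List Int) : Decidable (Spec_parse_trackset tracks out) := by unfold Spec_parse_trackset; infer_instance

-- ===== CLAIM (what is proved, stated in full; the proofs are below) =====
def Claim_equal_parse_trackset : Prop := ∀ (tracks : List String), Dom_parse_trackset tracks → Pre_parse_trackset tracks → Spec_parse_trackset tracks (parse_trackset tracks)

-- ===== LEMMAS AND PROOFS =====

-- the value A assigns to a known name
def trackValA (t : String) : Int :=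
  if t = "drum" then 3 else pitched_tracks.getD t 0

-- on the five known names: A's value = B's table value, and the name is a STOP_INDEX key
lemma known_facts {t : String} (h : t ∈ ["drum", "pulse1", "pulse2", "triangle", "attack"]) :
    (t = "drum" ∨ (pitched_tracks.get? t).isSome)
    ∧ trackValA t = STOP_INDEX.getD t 0 ∧ t ∈ STOP_INDEX.keys := by
  fin_cases h
  · exact ⟨Or.inl rfl, by decide, by decide⟩
  all_goals exact ⟨Or.inr (by decide), by decide, by decide⟩

-- A's loop, on known names, accumulates exactly the mapped values and never touches u
lemma parseLoopA_known (tracks : List String) (s : PySem.Set Int) (u : List String)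
    (h : ∀ t ∈ tracks, t = "drum" ∨ (pitched_tracks.get? t).isSome) :
    parseLoopA tracks s u = ((tracks.map trackValA).foldl PySem.Set.add s, u) := by
  induction tracks generalizing s with
  | nil => simp [parseLoopA]
  | cons t rest ih =>
    have ht := h t (List.mem_cons_self ..)
    have hrest : ∀ x ∈ rest, x = "drum" ∨ (pitched_tracks.get? x).isSome :=
      fun x hx => h x (List.mem_cons_of_mem _ hx)
    rcases ht with ht | ht
    · simp [parseLoopA, ht, ih _ hrest, trackValA]
    · rcases Option.isSome_iff_exists.mp ht with ⟨v, hv⟩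
      have hnone : pitched_tracks.get? "drum" = none := by decide
      have hne : ¬ t = "drum" := by
        intro he; rw [he, hnone] at hv; cases hv
      simp [parseLoopA, hne, hv, ih _ hrest, trackValA, PySem.Dict.getD]

-- ofList commutes with an (injective-on-the-list) map
lemma ofList_map_comm {α β : Type} [BEq α] [LawfulBEq α] [BEq β] [LawfulBEq β]
    (f : α → β) (xs : List α)
    (hinj : ∀ a ∈ xs, ∀ b ∈ xs, f a = f b → a = b) :
    PySem.Set.ofList (xs.map f) = (PySem.Set.ofList xs).map f := by
  induction xs using List.reverseRecOn with
  | nil => rfl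
  | append_singleton ys x ih =>
    have hys : ∀ a ∈ ys, ∀ b ∈ ys, f a = f b → a = b := fun a ha b hb =>
      hinj a (List.mem_append_left _ ha) b (List.mem_append_left _ hb)
    rw [List.map_append, List.map_singleton, PySem.Set.ofList_append_singleton,
        PySem.Set.ofList_append_singleton, ih hys]
    by_cases hx : x ∈ PySem.Set.ofList ys
    · have hfx : f x ∈ (PySem.Set.ofList ys).map f := List.mem_map_of_mem hx
      rw [PySem.Set.add_of_mem hfx, PySem.Set.add_of_mem hx]
    · have hfx : f x ∉ (PySem.Set.ofList ys).map f := by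
        intro hm
        rcases List.mem_map.mp hm with ⟨a, ha, hfa⟩
        have hxx : x ∈ ys ++ [x] := List.mem_append_right _ (List.mem_singleton.mpr rfl)
        have := hinj a (List.mem_append_left _ ((PySem.Set.mem_ofList _ _).mp ha)) x hxx hfa
        exact hx (this ▸ ha)
      rw [PySem.Set.add_of_not_mem hfx, PySem.Set.add_of_not_mem hx, List.map_append,
          List.map_singleton]

-- ===== VERDICT (by name: the statement is the Claim_ definition above) =====
theorem parse_trackset_spec : Claim_equal_parse_trackset := by
  intro tracks _ hpre
  have hknown : ∀ t ∈ tracks, t = "drum" ∨ (pitched_tracks.get? t).isSome :=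
    fun t ht => (known_facts (hpre t ht)).1
  have hkeys : ∀ t ∈ tracks, t ∈ STOP_INDEX.keys :=
    fun t ht => (known_facts (hpre t ht)).2.2
  have hval : ∀ t ∈ tracks, trackValA t = STOP_INDEX.getD t 0 :=
    fun t ht => (known_facts (hpre t ht)).2.1
  have hinj : ∀ a ∈ tracks, ∀ b ∈ tracks, STOP_INDEX.getD a 0 = STOP_INDEX.getD b 0 → a = b := by
    intro a ha b hb
    have ha' := hpre a ha; have hb' := hpre b hb
    fin_cases ha' <;> fin_cases hb' <;> simp_all <;> decide
  have hunknown : PySem.Set.diff (PySem.Set.ofList tracks) STOP_INDEX.keys = [] := by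
    rw [List.eq_nil_iff_forall_not_mem]
    intro x hx
    have := (PySem.Set.mem_diff _ _ _).mp hx
    exact this.2 (hkeys x ((PySem.Set.mem_ofList _ _).mp this.1))
  have hnodup : ((PySem.Set.ofList tracks).map (fun n => STOP_INDEX.getD n 0)).Nodup :=
    (PySem.Set.nodup_ofList tracks).map_on
      (fun a ha b hb h => hinj a ((PySem.Set.mem_ofList _ _).mp ha) b ((PySem.Set.mem_ofList _ _).mp hb) h)
  unfold Spec_parse_trackset parse_trackset parse_trackset_alt
  simp only [parseLoopA_known tracks PySem.Set.empty [] hknown, hunknown,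
    PySem.List.dedup_eq_ofList, ne_eq, not_true_eq_false, if_false]
  rw [PySem.Set.ofList_eq_self_of_nodup _ hnodup, ← ofList_map_comm _ _ hinj,
      ← List.map_congr_left hval, PySem.Set.ofList_eq_foldl]
  rfl
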